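-- pv_equiv track=rewrite | github.com/kazuhiko1979/edabit | Algebra Sequence - Boxes.py | box_seq
-- ===== SOURCE A (Python) =====
-- def box_seq(step):
--
--     target = 0
--
--     if step == 0:
--         return 0
--
--     elif step % 2:
--         target += 3
--         return box_seq(step-1) + 3
--     else:
--         target -= 1
--         return box_seq(step-1) - 1
--
--     return target
-- ===== SOURCE B (Python) =====
-- def box_seq(step):
--     # closed form: odd steps (count (step+1)//2) add 3, even steps (count step//2) subtract 1
--     return 3 * ((step + 1) // 2) - step // 2
-- ===== Notes on version B (the rewrite author's own statement) =====
-- stated objective: faster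
-- what changed: replaces the O(n) recursion with the closed-form 3*((step+1)//2) - step//2
import Mathlib
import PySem

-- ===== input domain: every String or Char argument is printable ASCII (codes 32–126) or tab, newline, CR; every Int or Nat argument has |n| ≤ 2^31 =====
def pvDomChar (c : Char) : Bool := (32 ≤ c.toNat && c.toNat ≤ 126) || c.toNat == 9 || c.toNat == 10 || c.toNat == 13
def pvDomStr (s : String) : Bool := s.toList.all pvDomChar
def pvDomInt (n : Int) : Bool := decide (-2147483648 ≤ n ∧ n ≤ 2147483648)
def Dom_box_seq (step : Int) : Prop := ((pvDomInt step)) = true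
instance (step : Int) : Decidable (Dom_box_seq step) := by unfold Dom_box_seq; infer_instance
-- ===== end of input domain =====

-- B replaces A's O(n) recursion by the closed form 3*((step+1)//2) - step//2 (faster, asymptotic).


-- ===== PORT A =====
-- A recurses on step-1; for step < 0 the Python recursion never reaches 0 (RecursionError),
-- so the port uses fuel step.toNat + 1, which suffices on all of Pre_ (0 ≤ step).
def box_seqFuel : Nat → Int → Int
  | 0, _ => 0
  | n + 1, step =>
    if step = 0 then 0
    else if PySem.Int.mod step 2 ≠ 0 then box_seqFuel n (step - 1) + 3
    else box_seqFuel n (step - 1) - 1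

def box_seq (step : Int) : Int := box_seqFuel (step.toNat + 1) step

-- ===== PORT B =====
def box_seq_alt (step : Int) : Int :=
  3 * PySem.Int.floordiv (step + 1) 2 - PySem.Int.floordiv step 2

-- ===== PRECONDITION & SPEC =====
-- Pre_ excludes step < 0, on which Python A recurses forever (RecursionError).
def Pre_box_seq (step : Int) : Prop := 0 ≤ step
instance (step : Int) : Decidable (Pre_box_seq step) := by unfold Pre_box_seq; infer_instance
def pvWitness_box_seq : Int := (5)

def Spec_box_seq (step : Int) (out : Int) : Prop := out = box_seq_alt step
instance (step : Int) (out : Int) : Decidable (Spec_box_seq step out) := by unfold Spec_box_seq; infer_instance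

-- ===== CLAIM =====
def Claim_equal_box_seq : Prop := ∀ (step : Int), Dom_box_seq step → Pre_box_seq step → Spec_box_seq step (box_seq step)

-- ===== LEMMAS AND PROOFS =====
theorem box_seqFuel_closed (n : Nat) :
    box_seqFuel (n + 1) (n : Int) = 3 * (((n : Int) + 1) / 2) - (n : Int) / 2 := by
  induction n with
  | zero => simp [box_seqFuel]
  | succ k ih =>
    have hstep : ((k + 1 : Nat) : Int) = (k : Int) + 1 := by push_cast; ring
    have hunf : box_seqFuel (k + 1 + 1) ((k : Int) + 1) =
        if ((k : Int) + 1) = 0 then 0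
        else if PySem.Int.mod ((k : Int) + 1) 2 ≠ 0 then box_seqFuel (k + 1) (((k : Int) + 1) - 1) + 3
        else box_seqFuel (k + 1) (((k : Int) + 1) - 1) - 1 := rfl
    rw [hstep, hunf, if_neg (by omega : ¬ ((k : Int) + 1) = 0),
        show ((k : Int) + 1) - 1 = (k : Int) from by ring,
        PySem.Int.mod_eq_emod_of_pos (by omega : (0 : Int) < 2)]
    by_cases h : ((k : Int) + 1) % 2 = 0
    · rw [if_neg (by omega : ¬ ((k : Int) + 1) % 2 ≠ 0), ih]; omega
    · rw [if_pos h, ih]; omega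

-- ===== VERDICT =====
theorem box_seq_spec : Claim_equal_box_seq := by
  intro step _ hpre
  unfold Pre_box_seq at hpre
  unfold Spec_box_seq box_seq box_seq_alt
  obtain ⟨n, rfl⟩ : ∃ n : Nat, step = (n : Int) := ⟨step.toNat, by omega⟩
  rw [PySem.Int.floordiv_eq_ediv_of_pos (by omega : (0 : Int) < 2),
      PySem.Int.floordiv_eq_ediv_of_pos (by omega : (0 : Int) < 2)]
  simpa using box_seqFuel_closed n
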